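-- pv_equiv track=rewrite | github.com/DaoWeiLim89/Guitar-Chord-Detector | formattingOutput.py | get_chord_changes
-- ===== SOURCE A (Python) =====
-- from typing import List, Optional
-- from typing import List, Optional
--
-- def get_chord_changes(centisecond_chords: List[Optional[str]]) -> List[tuple]:
--     """
--     Extract chord changes with timestamps.
--     Returns list of (centisecond, chord) tuples only when chord changes.
--     Args:
--         centisecond_chords: List of chords per centisecond
--     Returns:
--         List of (centisecond, chord_name) tuples
--     """
--     changes = []
--     current_chord = None
--
--     for cs, chord in enumerate(centisecond_chords):
--         if chord != current_chord:
--             changes.append((cs, chord))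
--             current_chord = chord
--
--     return changes
-- ===== SOURCE B (Python) =====
-- from typing import List, Optional
--
-- def get_chord_changes(centisecond_chords: List[Optional[str]]) -> List[tuple]:
--     """Record the start index of every maximal run of identical chords."""
--     changes = []
--     cs = 0
--     n = len(centisecond_chords)
--     while cs < n:
--         chord = centisecond_chords[cs]
--         changes.append((cs, chord))
--         cs += 1
--         while cs < n and centisecond_chords[cs] == chord:
--             cs += 1
--     return changes
-- ===== Notes on version B (the rewrite author's own statement) =====
-- stated objective: alternative
-- what changed: B traverses the list run by run with an outer loop that records each run's start index and an inner loop that skips to the end of the run, instead of A's per-element compare-to-previous scan with a current_chord state variable.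
-- intended difference: On nonempty inputs whose first centisecond has no chord (None), A's current_chord=None sentinel collides with the genuine None value and silently drops the timestamp of the leading no-chord run, so A omits (0, None); B records (0, None) like every other run start, which is the intended value since the output should timestamp every chord state change including the initial silence. — e.g. on get_chord_changes([none]): A returns [], B returns [(0, none)]
import Mathlib
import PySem

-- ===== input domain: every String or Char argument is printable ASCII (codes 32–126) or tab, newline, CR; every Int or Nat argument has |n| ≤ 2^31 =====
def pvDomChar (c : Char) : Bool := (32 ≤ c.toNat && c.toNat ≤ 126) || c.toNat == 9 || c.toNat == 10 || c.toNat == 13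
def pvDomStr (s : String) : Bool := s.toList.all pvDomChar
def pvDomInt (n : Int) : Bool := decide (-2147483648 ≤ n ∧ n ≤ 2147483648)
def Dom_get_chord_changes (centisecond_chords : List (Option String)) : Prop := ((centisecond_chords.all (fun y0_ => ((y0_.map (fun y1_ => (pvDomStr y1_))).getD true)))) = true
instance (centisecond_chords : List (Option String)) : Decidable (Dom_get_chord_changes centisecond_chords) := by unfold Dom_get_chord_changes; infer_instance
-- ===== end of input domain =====

-- B replaces A's per-element compare-to-previous scan (state: current_chord) with a run-by-run
-- traversal: an outer loop records each run's start index, an inner loop skips the run (objective: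
-- alternative). B also records a leading no-chord run, which A's None sentinel drops (see D_).


-- ===== PORT A =====
-- literal port of A: fold over enumerate, state = (changes, current_chord), append on change
def pvStepA (st : List (Int × Option String) × Option String) (p : Int × Option String) :
    List (Int × Option String) × Option String :=
  if p.2 ≠ st.2 then (st.1 ++ [(p.1, p.2)], p.2) else st

def get_chord_changes (centisecond_chords : List (Option String)) : List (Int × Option String) :=
  ((PySem.List.enumerate centisecond_chords 0).foldl pvStepA ([], none)).1

-- ===== PORT B =====
-- inner while loop: 'while cs < n and centisecond_chords[cs] == chord: cs += 1'
-- (fuel makes the recursion structural; fuel ≥ n - cs so the guard alone stops the loop)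
def pvSkipB (xs : List (Option String)) (n : Nat) (chord : Option String) :
    Nat → Nat → Nat
  | 0, cs => cs
  | fuel + 1, cs =>
    if cs < n ∧ xs.getD cs none == chord then pvSkipB xs n chord fuel (cs + 1) else cs

-- outer while loop: 'while cs < n: chord = xs[cs]; changes.append((cs, chord)); cs += 1; <inner>'
def pvOuterB (xs : List (Option String)) (n : Nat) :
    Nat → List (Int × Option String) → Nat → List (Int × Option String)
  | 0, changes, _ => changes
  | fuel + 1, changes, cs =>
    if cs < n then
      let chord := xs.getD cs none
      let cs' := pvSkipB xs n chord n (cs + 1)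
      pvOuterB xs n fuel (changes ++ [((cs : Int), chord)]) cs'
    else changes

def get_chord_changes_alt (centisecond_chords : List (Option String)) : List (Int × Option String) :=
  pvOuterB centisecond_chords centisecond_chords.length centisecond_chords.length [] 0

-- ===== PRECONDITION & SPEC =====
-- On nonempty inputs whose first centisecond has no chord (None), A's current_chord=None sentinel
-- collides with the genuine None value and drops the timestamp of the leading no-chord run, so A
-- omits (0, None); B records (0, None) like every other run start, which is the intended value.
def D_get_chord_changes (centisecond_chords : List (Option String)) : Prop :=
  centisecond_chords ≠ [] ∧ centisecond_chords.head? = some none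
instance (centisecond_chords : List (Option String)) : Decidable (D_get_chord_changes centisecond_chords) := by unfold D_get_chord_changes; infer_instance

def Spec_get_chord_changes (centisecond_chords : List (Option String)) (out : List (Int × Option String)) : Prop := ¬ D_get_chord_changes centisecond_chords → out = get_chord_changes_alt centisecond_chords
instance (centisecond_chords : List (Option String)) (out : List (Int × Option String)) : Decidable (Spec_get_chord_changes centisecond_chords out) := by unfold Spec_get_chord_changes; infer_instance

def pvDiffWitness_get_chord_changes : List (Option String) := [none]
def pvDiffWitnessOut_get_chord_changes :
    (List (Int × Option String)) × (List (Int × Option String)) := ([], [(0, none)])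

-- ===== CLAIM =====
def Claim_unchanged_get_chord_changes : Prop := ∀ (centisecond_chords : List (Option String)), Dom_get_chord_changes centisecond_chords → Spec_get_chord_changes centisecond_chords (get_chord_changes centisecond_chords)
def Claim_changed_get_chord_changes : Prop := Dom_get_chord_changes (pvDiffWitness_get_chord_changes) ∧ D_get_chord_changes (pvDiffWitness_get_chord_changes) ∧ get_chord_changes (pvDiffWitness_get_chord_changes) = pvDiffWitnessOut_get_chord_changes.1 ∧ get_chord_changes_alt (pvDiffWitness_get_chord_changes) = pvDiffWitnessOut_get_chord_changes.2 ∧ pvDiffWitnessOut_get_chord_changes.1 ≠ pvDiffWitnessOut_get_chord_changes.2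
def Claim_exact_get_chord_changes : Prop := ∀ (centisecond_chords : List (Option String)), Dom_get_chord_changes centisecond_chords → D_get_chord_changes centisecond_chords → get_chord_changes centisecond_chords ≠ get_chord_changes_alt centisecond_chords

-- ===== LEMMAS AND PROOFS =====

-- accumulator-free version of A's loop
def pvEmitA (cs : Int) (cur : Option String) : List (Option String) → List (Int × Option String)
  | [] => []
  | x :: xs => if x ≠ cur then (cs, x) :: pvEmitA (cs + 1) x xs else pvEmitA (cs + 1) cur xs

theorem pvFoldA (xs : List (Option String)) : ∀ (acc : List (Int × Option String))
    (cur : Option String) (n : Int),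
    ((PySem.List.enumerate xs n).foldl pvStepA (acc, cur)).1 = acc ++ pvEmitA n cur xs := by
  induction xs with
  | nil => intro acc cur n; simp [PySem.List.enumerate_nil, pvEmitA]
  | cons x xs ih =>
    intro acc cur n
    rw [PySem.List.enumerate_cons, List.foldl_cons]
    by_cases h : x = cur
    · rw [show pvStepA (acc, cur) (n, x) = (acc, cur) from by simp [pvStepA, h], ih]
      simp [pvEmitA, h]
    · rw [show pvStepA (acc, cur) (n, x) = (acc ++ [(n, x)], x) from by simp [pvStepA, h], ih]
      simp [pvEmitA, h]

-- a run of elements all equal to the current chord emits nothing, only advances the index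
theorem pvSkipEmit (g : List (Option String)) (x : Option String) (h : ∀ y ∈ g, y = x) :
    ∀ (rest : List (Option String)) (cs : Int),
      pvEmitA cs x (g ++ rest) = pvEmitA (cs + g.length) x rest := by
  induction g with
  | nil => intro rest cs; simp
  | cons a g ih =>
    intro rest cs
    have ha : a = x := h a (by simp)
    have hg : ∀ y ∈ g, y = x := fun y hy => h y (by simp [hy])
    rw [List.cons_append,
      show pvEmitA cs x (a :: (g ++ rest)) = pvEmitA (cs + 1) x (g ++ rest) from by
        simp [pvEmitA, ha],
      ih hg]
    congr 1
    simp only [List.length_cons]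
    push_cast
    ring

-- every index emitted by A's scan is at least the current index
theorem pvEmitA_mem : ∀ (ys : List (Option String)) (cs : Int) (cur : Option String)
    (p : Int × Option String), p ∈ pvEmitA cs cur ys → cs ≤ p.1 := by
  intro ys
  induction ys with
  | nil => intro cs cur p hp; simp [pvEmitA] at hp
  | cons x ys ih =>
    intro cs cur p hp
    simp only [pvEmitA] at hp
    by_cases h : x = cur
    · rw [if_neg (by simp [h])] at hp
      have := ih (cs + 1) cur p hp
      omega
    · rw [if_pos h] at hp
      rcases List.mem_cons.mp hp with h1 | h1
      · subst h1; simp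
      · have := ih (cs + 1) x p h1
        omega

-- dropWhile as a drop past the matched prefix (not found in Mathlib under this statement)
theorem pv_dropWhile_eq_drop (p : Option String → Bool) (l : List (Option String)) :
    l.dropWhile p = l.drop (l.takeWhile p).length := by
  induction l with
  | nil => simp
  | cons a l ih =>
    by_cases h : p a
    · simp [h, ih]
    · simp [h]

-- the head surviving dropWhile fails the predicate
theorem pv_head_dropWhile (p : Option String → Bool) (l : List (Option String)) :
    ∀ h, (l.dropWhile p).head? = some h → p h = false := by
  induction l with
  | nil => intro h hh; simp at hh
  | cons a l ih =>
    intro h hh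
    by_cases hp : p a
    · exact ih h (by simpa [List.dropWhile_cons, hp] using hh)
    · rw [List.dropWhile_cons_of_neg (by simpa using hp)] at hh
      simp at hh
      subst hh
      simpa using hp

-- the inner loop lands at the end of the current run
theorem pvSkipB_spec (xs : List (Option String)) (chord : Option String) :
    ∀ (fuel cs : Nat), xs.length - cs ≤ fuel →
      pvSkipB xs xs.length chord fuel cs
        = cs + ((xs.drop cs).takeWhile (fun y => y == chord)).length := by
  intro fuel
  induction fuel with
  | zero =>
    intro cs h
    have hcs : xs.length ≤ cs := by omega
    rw [List.drop_eq_nil_of_le hcs]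
    simp [pvSkipB]
  | succ fuel ih =>
    intro cs h
    by_cases hlt : cs < xs.length
    · have hdrop : xs.drop cs = xs[cs] :: xs.drop (cs + 1) := List.drop_eq_getElem_cons hlt
      have hgetD : xs.getD cs none = xs[cs] := List.getD_eq_getElem xs none hlt
      by_cases heq : xs[cs] = chord
      · rw [show pvSkipB xs xs.length chord (fuel + 1) cs
              = pvSkipB xs xs.length chord fuel (cs + 1) from by
            simp [pvSkipB, hlt, heq]]
        rw [ih (cs + 1) (by omega), hdrop]
        simp [heq]
        omega
      · rw [show pvSkipB xs xs.length chord (fuel + 1) cs = cs from by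
            simp [pvSkipB, hlt, heq], hdrop]
        simp [heq]
    · have hcs : xs.length ≤ cs := by omega
      rw [List.drop_eq_nil_of_le hcs]
      simp [pvSkipB, hlt]

-- B's run loop computes A's element scan, provided the run about to start differs from cur
theorem pvOuterB_emit (xs : List (Option String)) :
    ∀ (fuel cs : Nat) (changes : List (Int × Option String)) (cur : Option String),
      xs.length - cs ≤ fuel →
      (∀ h, (xs.drop cs).head? = some h → h ≠ cur) →
      pvOuterB xs xs.length fuel changes cs = changes ++ pvEmitA (cs : Int) cur (xs.drop cs) := by
  intro fuel
  induction fuel with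
  | zero =>
    intro cs changes cur h _
    have hcs : xs.length ≤ cs := by omega
    rw [List.drop_eq_nil_of_le hcs]
    simp [pvOuterB, pvEmitA]
  | succ fuel ih =>
    intro cs changes cur h hhead
    by_cases hlt : cs < xs.length
    · have hdrop : xs.drop cs = xs[cs] :: xs.drop (cs + 1) := List.drop_eq_getElem_cons hlt
      have hgetD : xs.getD cs none = xs[cs] := List.getD_eq_getElem xs none hlt
      have hxne : xs[cs] ≠ cur := hhead xs[cs] (by rw [hdrop]; rfl)
      set rest := xs.drop (cs + 1) with hrest
      set g := rest.takeWhile (fun y => y == xs[cs]) with hgdef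
      have hcs' : pvSkipB xs xs.length (xs.getD cs none) xs.length (cs + 1)
          = (cs + 1) + g.length := by
        rw [hgetD]; exact pvSkipB_spec xs xs[cs] xs.length (cs + 1) (by omega)
      have hcs'' : pvSkipB xs xs.length xs[cs] xs.length (cs + 1) = (cs + 1) + g.length := by
        rw [← hgetD]; exact hcs'
      rw [show pvOuterB xs xs.length (fuel + 1) changes cs
            = pvOuterB xs xs.length fuel (changes ++ [((cs : Int), xs[cs])])
                ((cs + 1) + g.length) from by
          simp only [pvOuterB, if_pos hlt, hgetD, hcs'']]
      have hdrop' : xs.drop ((cs + 1) + g.length) = rest.dropWhile (fun y => y == xs[cs]) := by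
        rw [pv_dropWhile_eq_drop, ← hgdef, ← List.drop_drop, ← hrest]
      have hhead' : ∀ h, (xs.drop ((cs + 1) + g.length)).head? = some h → h ≠ xs[cs] := by
        intro h hh
        rw [hdrop'] at hh
        have := pv_head_dropWhile (fun y => y == xs[cs]) rest h hh
        simpa using this
      rw [ih ((cs + 1) + g.length) _ xs[cs] (by omega) hhead']
      have hg_all : ∀ y ∈ g, y = xs[cs] := by
        intro y hy
        have := List.mem_takeWhile_imp hy
        simpa using this
      have hsplit : g ++ rest.dropWhile (fun y => y == xs[cs]) = rest :=
        List.takeWhile_append_dropWhile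
      have hemit : pvEmitA (cs : Int) cur (xs.drop cs)
          = ((cs : Int), xs[cs]) :: pvEmitA (((cs + 1) + g.length : Nat) : Int) xs[cs]
              (xs.drop ((cs + 1) + g.length)) := by
        rw [hdrop,
          show pvEmitA (cs : Int) cur (xs[cs] :: rest)
              = ((cs : Int), xs[cs]) :: pvEmitA ((cs : Int) + 1) xs[cs] rest from by
            simp [pvEmitA, hxne],
          ← hsplit, pvSkipEmit g xs[cs] hg_all, hdrop']
        norm_num
      rw [hemit]
      simp
    · have hcs : xs.length ≤ cs := by omega
      rw [List.drop_eq_nil_of_le hcs]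
      simp [pvOuterB, hlt, pvEmitA]

-- B's two loops only ever append: the accumulator is a prefix of the result
theorem pvOuterB_prefix (xs : List (Option String)) (n : Nat) :
    ∀ (fuel cs : Nat) (changes : List (Int × Option String)),
      ∃ t, pvOuterB xs n fuel changes cs = changes ++ t := by
  intro fuel
  induction fuel with
  | zero => intro cs changes; exact ⟨[], by simp [pvOuterB]⟩
  | succ fuel ih =>
    intro cs changes
    by_cases hlt : cs < n
    · obtain ⟨t, ht⟩ := ih (pvSkipB xs n (xs.getD cs none) n (cs + 1))
        (changes ++ [((cs : Int), xs.getD cs none)])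
      exact ⟨((cs : Int), xs.getD cs none) :: t, by
        simp only [pvOuterB, if_pos hlt, ht]; simp⟩
    · exact ⟨[], by simp [pvOuterB, hlt]⟩

-- ===== VERDICT =====
theorem get_chord_changes_spec : Claim_unchanged_get_chord_changes := by
  intro xs _ hnd
  unfold get_chord_changes get_chord_changes_alt
  rw [pvFoldA xs [] none 0]
  cases xs with
  | nil => simp [pvOuterB, pvEmitA]
  | cons x rest =>
    have hx : x ≠ none := by
      intro hxe
      exact hnd ⟨by simp, by simp [hxe]⟩
    rw [pvOuterB_emit (x :: rest) (x :: rest).length 0 [] none (by omega)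
      (by intro h hh; simp at hh; subst hh; exact hx)]
    simp

theorem get_chord_changes_changed : Claim_changed_get_chord_changes := by
  unfold Claim_changed_get_chord_changes; decide

theorem get_chord_changes_tight : Claim_exact_get_chord_changes := by
  intro xs _ hD heq
  obtain ⟨hne, hhd⟩ := hD
  cases xs with
  | nil => exact hne rfl
  | cons x rest =>
    have hx : x = none := by simpa using hhd
    subst hx
    have hA : get_chord_changes (none :: rest) = pvEmitA 1 none rest := by
      unfold get_chord_changes
      rw [pvFoldA _ [] none 0]
      simp [pvEmitA]
    obtain ⟨t, ht⟩ := pvOuterB_prefix (none :: rest) (none :: rest).length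
      (rest.length) (pvSkipB (none :: rest) (none :: rest).length none
        (none :: rest).length 1) [((0 : Int), (none : Option String))]
    have hB : get_chord_changes_alt (none :: rest)
        = ((0 : Int), (none : Option String)) :: t := by
      unfold get_chord_changes_alt
      rw [show pvOuterB (none :: rest) (none :: rest).length (none :: rest).length [] 0
            = pvOuterB (none :: rest) (none :: rest).length rest.length
                [((0 : Int), (none : Option String))]
                (pvSkipB (none :: rest) (none :: rest).length none
                  (none :: rest).length 1) from by
          simp [pvOuterB]]
      rw [ht]
      simp
    rw [hA, hB] at heq
    have hmem : ((0 : Int), (none : Option String)) ∈ pvEmitA 1 none rest := by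
      rw [heq]; exact List.mem_cons_self
    have := pvEmitA_mem rest 1 none _ hmem
    simp at this
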